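-- pv_equiv track=rewrite | github.com/jackasser/Self_Evolving_AI | web_knowledge_fetcher.py | _get_relevant_sections
-- ===== SOURCE A (Python) =====
-- from typing import Dict, List, Any, Optional, Tuple
--
-- def _get_relevant_sections(sections: List[str], query: str) -> List[str]:
--     """
--     クエリに関連するセクションを取得
--
--     Args:
--         sections: セクションのリスト
--         query: 検索クエリ
--
--     Returns:
--         関連するセクションのリスト
--     """
--     query_words = set(query.lower().split())
--
--     # 各セクションの関連スコアを計算
--     section_scores = []
--
--     for section in sections:
--         # 単語の一致数をカウント
--         section_words = set(section.lower().split())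
--         matching_words = query_words.intersection(section_words)
--
--         # スコアを計算
--         score = len(matching_words) / len(query_words) if query_words else 0
--
--         section_scores.append((section, score))
--
--     # スコアで降順にソート
--     section_scores.sort(key=lambda x: x[1], reverse=True)
--
--     # 上位のセクションを返す（最低でも1つ）
--     relevant_sections = [s[0] for s in section_scores[:max(3, len(sections))]]
--
--     if not relevant_sections:
--         return sections[:1]
--
--     return relevant_sections
-- ===== SOURCE B (Python) =====
-- def _get_relevant_sections(sections, query):
--     """Bucket sections by query-word match count; concatenate buckets high-to-low.
--
--     Same ordering as sorting by score descending (denominator is fixed), stable,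
--     with no float arithmetic.
--     """
--     query_words = set(query.lower().split())
--     n = len(query_words)
--     buckets = [[] for _ in range(n + 1)]
--     for section in sections:
--         c = len(query_words & set(section.lower().split()))
--         buckets[c].append(section)
--     ordered = []
--     for bucket in reversed(buckets):
--         ordered.extend(bucket)
--     return ordered
-- ===== Notes on version B (the rewrite author's own statement) =====
-- stated objective: alternative
-- what changed: Replaces the float-score comparison sort with a counting sort: each section is appended to the bucket of its integer query-word match count and the buckets are concatenated from highest count down (the fixed denominator makes score order equal count order, and the always-full slice and empty guard are redundant).
import Mathlib
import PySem

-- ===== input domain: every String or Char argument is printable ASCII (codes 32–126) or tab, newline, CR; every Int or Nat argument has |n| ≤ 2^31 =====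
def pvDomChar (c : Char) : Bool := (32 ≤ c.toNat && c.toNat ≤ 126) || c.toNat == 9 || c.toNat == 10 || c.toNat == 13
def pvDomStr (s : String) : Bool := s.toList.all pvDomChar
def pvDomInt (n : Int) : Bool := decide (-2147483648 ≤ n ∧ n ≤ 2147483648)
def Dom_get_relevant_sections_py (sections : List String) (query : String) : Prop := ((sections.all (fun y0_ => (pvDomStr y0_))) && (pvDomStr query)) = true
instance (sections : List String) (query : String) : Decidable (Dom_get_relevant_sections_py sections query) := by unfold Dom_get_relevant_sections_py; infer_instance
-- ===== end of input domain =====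

-- B buckets sections by query-word match count and concatenates buckets high-to-low
-- (counting sort on the bounded integer key, no float division) instead of A's
-- comparison sort on float scores; equal ordering since the denominator is fixed.


-- ===== PORT A =====
-- A's float score len(matching)/len(query_words) has a FIXED positive denominator and is
-- used only as a sort key, so it is represented exactly (for ordering, which is all the
-- program observes) by the integer numerator len(matching); the `if query_words` branch
-- is kept literally.
def get_relevant_sections_py (sections : List String) (query : String) : List String :=
  let query_words : PySem.Set String := PySem.Set.ofList (PySem.Str.split₀ (PySem.Str.lower query))
  let section_scores : List (String × Int) := sections.foldl (fun acc sec =>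
    let section_words : PySem.Set String := PySem.Set.ofList (PySem.Str.split₀ (PySem.Str.lower sec))
    let matching_words := PySem.Set.inter query_words section_words
    let score : Int := if query_words ≠ [] then PySem.Set.len matching_words else 0
    acc ++ [(sec, score)]) []
  let sorted := PySem.List.sorted section_scores (fun x => x.2) true
  let relevant_sections := (PySem.List.slice sorted none (some (max 3 (sections.length : Int)))).map (fun s => s.1)
  if relevant_sections = [] then PySem.List.slice sections none (some 1)
  else relevant_sections

-- ===== PORT B =====
def get_relevant_sections_py_alt (sections : List String) (query : String) : List String :=
  let query_words : PySem.Set String := PySem.Set.ofList (PySem.Str.split₀ (PySem.Str.lower query))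
  let n := query_words.length
  let buckets : List (List String) := (List.range (n + 1)).map (fun _ => [])
  let buckets := sections.foldl (fun bs sec =>
    let c := (PySem.Set.inter query_words (PySem.Set.ofList (PySem.Str.split₀ (PySem.Str.lower sec)))).length
    bs.set c (bs.getD c [] ++ [sec])) buckets
  buckets.reverse.foldl (fun acc bucket => acc ++ bucket) []

-- ===== PRECONDITION & SPEC =====
def Spec_get_relevant_sections_py (sections : List String) (query : String) (out : List String) : Prop := out = get_relevant_sections_py_alt sections query
instance (sections : List String) (query : String) (out : List String) : Decidable (Spec_get_relevant_sections_py sections query out) := by unfold Spec_get_relevant_sections_py; infer_instance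

-- ===== CLAIM (what is proved, stated in full; the proofs are below) =====
def Claim_equal_get_relevant_sections_py : Prop := ∀ (sections : List String) (query : String), Dom_get_relevant_sections_py sections query → Spec_get_relevant_sections_py sections query (get_relevant_sections_py sections query)

-- ===== LEMMAS AND PROOFS =====

-- match count of one section against the (deduplicated) query words
def pvCnt (qws : PySem.Set String) (s : String) : Nat :=
  (PySem.Set.inter qws (PySem.Set.ofList (PySem.Str.split₀ (PySem.Str.lower s)))).length

lemma pvCnt_le (qws : PySem.Set String) (s : String) : pvCnt qws s ≤ qws.length := by
  unfold pvCnt PySem.Set.inter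
  exact List.length_filter_le _ _

-- foldl (++) is flatten
lemma foldl_append_flatten {α : Type} (l : List (List α)) (acc : List α) :
    l.foldl (fun a b => a ++ b) acc = acc ++ l.flatten := by
  induction l generalizing acc with
  | nil => simp
  | cons h t ih => simp [List.foldl_cons, ih, List.flatten_cons]

-- insertBy lands between the block of keys ≥ its own and the block of keys < its own
lemma insertBy_split {α : Type} (before : α → α → Bool) (x : α) (as bs : List α)
    (h1 : ∀ a ∈ as, before x a = false) (h2 : ∀ b ∈ bs, before x b = true) :
    PySem.List.insertBy before x (as ++ bs) = as ++ x :: bs := by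
  induction as with
  | nil =>
    cases bs with
    | nil => rfl
    | cons b bs => simp [PySem.List.insertBy, h2 b (by simp)]
  | cons a as ih =>
    simp only [List.cons_append, PySem.List.insertBy, h1 a (by simp)]
    simp only [Bool.false_eq_true, if_false]
    rw [ih (fun z hz => h1 z (by simp [hz]))]

-- the descending-bucket concatenation both programs produce
def descConcat {α : Type} (n : Nat) (key : α → Nat) (xs : List α) : List α :=
  ((List.range (n + 1)).reverse).flatMap (fun k => xs.filter (fun y => key y == k))

lemma range_reverse_split (n c : Nat) (hc : c ≤ n) :
    (List.range (n + 1)).reverse =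
      (List.range' (c + 1) (n - c)).reverse ++ c :: (List.range c).reverse := by
  have h : List.range (n + 1) = List.range c ++ c :: List.range' (c + 1) (n - c) := by
    rw [List.range_eq_range']
    rw [show n + 1 = c + (n + 1 - c) by omega]
    rw [← List.range'_append]
    congr 1
    · exact List.range_eq_range'.symm
    · rw [show n + 1 - c = (n - c) + 1 by omega]
      simp [List.range'_succ]
  rw [h]; simp

-- one insertion step: inserting x into descConcat xs yields descConcat (xs ++ [x])
lemma insert_descConcat {α : Type} (n : Nat) (key : α → Nat) (x : α) (xs : List α)
    (hx : key x ≤ n) :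
    PySem.List.insertBy (fun a b => decide ((key b : Int) < (key a : Int))) x
      (descConcat n key xs) = descConcat n key (xs ++ [x]) := by
  set c := key x with hcdef
  have hsplit := range_reverse_split n c hx
  unfold descConcat
  rw [hsplit]
  rw [List.flatMap_append, List.flatMap_cons, List.flatMap_append, List.flatMap_cons]
  have hhi : ∀ y ∈ (List.range' (c + 1) (n - c)).reverse.flatMap
      (fun k => xs.filter (fun y => key y == k)), c ≤ key y := by
    intro y hy
    obtain ⟨k, hk, hyk⟩ := List.mem_flatMap.mp hy
    have hkm : k ∈ List.range' (c + 1) (n - c) := List.mem_reverse.mp hk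
    obtain ⟨i, hi, hki⟩ := List.mem_range'.mp hkm
    have hyk2 := List.of_mem_filter hyk
    have : key y = k := by simpa using hyk2
    omega
  have hlo : ∀ y ∈ (List.range c).reverse.flatMap
      (fun k => xs.filter (fun y => key y == k)), key y < c := by
    intro y hy
    obtain ⟨k, hk, hyk⟩ := List.mem_flatMap.mp hy
    have hkm : k ∈ List.range c := List.mem_reverse.mp hk
    have hklt : k < c := List.mem_range.mp hkm
    have := List.of_mem_filter hyk
    have : key y = k := by simpa using this
    omega
  have hcx : (xs ++ [x]).filter (fun y => key y == c) =
      xs.filter (fun y => key y == c) ++ [x] := by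
    rw [List.filter_append]; simp [hcdef]
  have hother : ∀ k, k ≠ c → (xs ++ [x]).filter (fun y => key y == k) =
      xs.filter (fun y => key y == k) := by
    intro k hk
    rw [List.filter_append]
    have : (key x == k) = false := by simp [← hcdef]; omega
    simp [List.filter, this]
  have hhiMap : (List.range' (c + 1) (n - c)).reverse.flatMap
      (fun k => (xs ++ [x]).filter (fun y => key y == k)) =
      (List.range' (c + 1) (n - c)).reverse.flatMap
      (fun k => xs.filter (fun y => key y == k)) := by
    apply List.flatMap_congr
    intro k hk
    obtain ⟨i, hi, hki⟩ := List.mem_range'.mp (List.mem_reverse.mp hk)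
    exact hother k (by omega)
  have hloMap : (List.range c).reverse.flatMap
      (fun k => (xs ++ [x]).filter (fun y => key y == k)) =
      (List.range c).reverse.flatMap
      (fun k => xs.filter (fun y => key y == k)) := by
    apply List.flatMap_congr
    intro k hk
    have : k < c := List.mem_range.mp (List.mem_reverse.mp hk)
    exact hother k (by omega)
  rw [hhiMap, hloMap, hcx]
  have hstep : PySem.List.insertBy (fun a b => decide ((key b : Int) < (key a : Int))) x
      (((List.range' (c + 1) (n - c)).reverse.flatMap (fun k => xs.filter (fun y => key y == k)) ++
        xs.filter (fun y => key y == c)) ++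
        (List.range c).reverse.flatMap (fun k => xs.filter (fun y => key y == k))) =
      ((List.range' (c + 1) (n - c)).reverse.flatMap (fun k => xs.filter (fun y => key y == k)) ++
        xs.filter (fun y => key y == c)) ++ x ::
        (List.range c).reverse.flatMap (fun k => xs.filter (fun y => key y == k)) := by
    apply insertBy_split
    · intro a ha
      rcases List.mem_append.mp ha with hm | hm
      · have := hhi a hm
        simp only [decide_eq_false_iff_not, not_lt]
        exact_mod_cast this
      · have := List.of_mem_filter hm
        have hac : key a = c := by simpa using this
        simp only [decide_eq_false_iff_not, not_lt]
        have : key x ≤ key a := by omega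
        exact_mod_cast this
    · intro b hb
      have hblt := hlo b hb
      simp only [decide_eq_true_eq]
      have : key b < key x := by omega
      exact_mod_cast this
  simp only [← List.append_assoc] at hstep ⊢
  rw [hstep]
  simp

-- Python's stable sort (reverse=True) on a bounded Nat key IS the bucket concatenation
lemma sorted_rev_eq_descConcat {α : Type} (n : Nat) (key : α → Nat) (xs : List α)
    (h : ∀ x ∈ xs, key x ≤ n) :
    PySem.List.sorted xs (fun y => ((key y : Int))) true = descConcat n key xs := by
  rw [PySem.List.sorted_rev_eq_foldl_insertBy]
  induction xs using List.reverseRecOn with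
  | nil => simp [descConcat]
  | append_singleton ys y ih =>
    rw [List.foldl_append, List.foldl_cons, List.foldl_nil]
    rw [ih (fun z hz => h z (by simp [hz]))]
    exact insert_descConcat n key y ys (h y (by simp))

-- the bucket fold over a list of the map-over-range shape, elementwise
lemma set_map_range {α : Type} (m : Nat) (h : Nat → α) (c : Nat) (v : α) :
    ((List.range m).map h).set c v = (List.range m).map (fun k => if k = c then v else h k) := by
  apply List.ext_getElem
  · simp
  · intro i h1 h2
    simp only [List.getElem_set, List.getElem_map, List.getElem_range]
    split_ifs with e e2 e2
    · rfl
    · omega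
    · omega
    · rfl

lemma getD_map_range' {α : Type} (m : Nat) (h : Nat → List α) (c : Nat) (hc : c < m) :
    ((List.range m).map h).getD c [] = h c := by
  rw [List.getD_eq_getElem?_getD]
  simp [hc]

lemma bucket_fold (qws : PySem.Set String) (xs : List String) (h : Nat → List String) :
    xs.foldl (fun bs sec =>
        bs.set (PySem.Set.inter qws (PySem.Set.ofList (PySem.Str.split₀ (PySem.Str.lower sec)))).length
          (bs.getD (PySem.Set.inter qws (PySem.Set.ofList (PySem.Str.split₀ (PySem.Str.lower sec)))).length [] ++ [sec]))
      ((List.range (qws.length + 1)).map h) =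
    (List.range (qws.length + 1)).map (fun k => h k ++ xs.filter (fun s => pvCnt qws s == k)) := by
  induction xs generalizing h with
  | nil => simp
  | cons s xs ih =>
    rw [List.foldl_cons]
    have hc : pvCnt qws s < qws.length + 1 := by
      have := pvCnt_le qws s; omega
    show List.foldl _ (((List.range (qws.length + 1)).map h).set (pvCnt qws s)
        (((List.range (qws.length + 1)).map h).getD (pvCnt qws s) [] ++ [s])) xs = _
    rw [getD_map_range' _ h _ hc, set_map_range _ h _ _, ih]
    apply List.map_congr_left
    intro k hk
    by_cases e : pvCnt qws s = k
    · simp [← e]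
    · have : (pvCnt qws s == k) = false := by simp [e]
      simp [this]
      intro e'; exact absurd e'.symm e

-- the deduplicated, lower-cased query words
def pvQ (query : String) : PySem.Set String :=
  PySem.Set.ofList (PySem.Str.split₀ (PySem.Str.lower query))

-- A's float score, as the exact integer numerator
lemma score_eq (q : PySem.Set String) (s : String) :
    (if q ≠ [] then PySem.Set.len (PySem.Set.inter q (PySem.Set.ofList (PySem.Str.split₀ (PySem.Str.lower s)))) else 0)
      = ((pvCnt q s : Nat) : Int) := by
  by_cases hq : q = []
  · subst hq; simp [pvCnt, PySem.Set.inter]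
  · simp [hq, pvCnt, PySem.Set.len, PySem.Set.inter]

lemma insertBy_map {α β : Type} (f : α → β) (before : β → β → Bool) (x : α) (l : List α) :
    PySem.List.insertBy before (f x) (l.map f)
      = (PySem.List.insertBy (fun a b => before (f a) (f b)) x l).map f := by
  induction l with
  | nil => rfl
  | cons a l ih =>
    simp only [List.map_cons, PySem.List.insertBy]
    by_cases h : before (f x) (f a)
    · simp [h]
    · simp only [h, Bool.false_eq_true, if_false, List.map_cons, ih]

lemma sorted_rev_map {α β κ : Type} [LT κ] [DecidableLT κ] (f : α → β) (key : β → κ) (xs : List α) :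
    PySem.List.sorted (xs.map f) key true
      = (PySem.List.sorted xs (fun a => key (f a)) true).map f := by
  rw [PySem.List.sorted_rev_eq_foldl_insertBy, PySem.List.sorted_rev_eq_foldl_insertBy]
  rw [List.foldl_map]
  have : ∀ (acc : List α),
      xs.foldl (fun acc x => PySem.List.insertBy (fun a b => decide (key b < key a)) (f x) acc) (acc.map f)
        = (xs.foldl (fun acc x => PySem.List.insertBy (fun a b => decide (key (f b) < key (f a))) x acc) acc).map f := by
    induction xs with
    | nil => intro acc; rfl
    | cons x xs ih =>
      intro acc
      simp only [List.foldl_cons]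
      rw [insertBy_map f (fun a b => decide (key b < key a)) x acc, ih]
  exact this []

lemma descConcat_length {α : Type} (n : Nat) (key : α → Nat) (xs : List α)
    (h : ∀ x ∈ xs, key x ≤ n) : (descConcat n key xs).length = xs.length := by
  rw [← sorted_rev_eq_descConcat n key xs h]
  exact PySem.List.length_sorted _ _ _

lemma alt_eq_descConcat (sections : List String) (query : String) :
    get_relevant_sections_py_alt sections query
      = descConcat (pvQ query).length (pvCnt (pvQ query)) sections := by
  simp only [get_relevant_sections_py_alt]
  rw [show PySem.Set.ofList (PySem.Str.split₀ (PySem.Str.lower query)) = pvQ query from rfl]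
  rw [bucket_fold (pvQ query) sections (fun _ => [])]
  rw [foldl_append_flatten]
  simp only [List.nil_append, descConcat]
  rw [← List.map_reverse]
  rw [← List.flatMap_def]

lemma a_eq_descConcat (sections : List String) (query : String) (hne : sections ≠ []) :
    get_relevant_sections_py sections query
      = descConcat (pvQ query).length (pvCnt (pvQ query)) sections := by
  simp only [get_relevant_sections_py]
  rw [PySem.List.foldl_append_singleton_eq_map
    (fun sec => (sec, if PySem.Set.ofList (PySem.Str.split₀ (PySem.Str.lower query)) ≠ [] then
      PySem.Set.len (PySem.Set.inter (PySem.Set.ofList (PySem.Str.split₀ (PySem.Str.lower query)))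
        (PySem.Set.ofList (PySem.Str.split₀ (PySem.Str.lower sec)))) else 0)) sections []]
  have hf : (fun sec => (sec, if PySem.Set.ofList (PySem.Str.split₀ (PySem.Str.lower query)) ≠ [] then
      PySem.Set.len (PySem.Set.inter (PySem.Set.ofList (PySem.Str.split₀ (PySem.Str.lower query)))
        (PySem.Set.ofList (PySem.Str.split₀ (PySem.Str.lower sec)))) else 0))
      = (fun s => (s, ((pvCnt (pvQ query) s : Nat) : Int))) := by
    funext s
    rw [score_eq (PySem.Set.ofList (PySem.Str.split₀ (PySem.Str.lower query))) s]
    rfl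
  rw [hf]
  rw [List.nil_append]
  rw [sorted_rev_map (fun s => (s, ((pvCnt (pvQ query) s : Nat) : Int))) (fun x => x.2) sections]
  simp only []
  rw [sorted_rev_eq_descConcat (pvQ query).length (pvCnt (pvQ query)) sections
    (fun x _ => pvCnt_le (pvQ query) x)]
  have hlen : ((descConcat (pvQ query).length (pvCnt (pvQ query)) sections).map
      (fun s => (s, ((pvCnt (pvQ query) s : Nat) : Int)))).length = sections.length := by
    rw [List.length_map]
    exact descConcat_length _ _ _ (fun x _ => pvCnt_le (pvQ query) x)
  rw [PySem.List.slice_to _ (by omega : (0:Int) ≤ max 3 (sections.length : Int))]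
  rw [List.take_of_length_le (by rw [hlen]; omega)]
  rw [List.map_map]
  have : ((fun s : String × Int => s.1) ∘ (fun s => (s, ((pvCnt (pvQ query) s : Nat) : Int))))
      = fun s => s := rfl
  rw [this, List.map_id']
  have hne2 : descConcat (pvQ query).length (pvCnt (pvQ query)) sections ≠ [] := by
    intro h
    apply hne
    have := descConcat_length (pvQ query).length (pvCnt (pvQ query)) sections
      (fun x _ => pvCnt_le (pvQ query) x)
    rw [h] at this
    exact List.length_eq_zero_iff.mp this.symm
  simp [hne2]

-- ===== VERDICT (by name: the statement is the Claim_ definition above) =====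
theorem get_relevant_sections_py_spec : Claim_equal_get_relevant_sections_py := by
  intro sections query _
  unfold Spec_get_relevant_sections_py
  by_cases hne : sections = []
  · subst hne
    rw [alt_eq_descConcat]
    have hA : get_relevant_sections_py [] query = [] := rfl
    rw [hA]
    simp [descConcat, List.flatMap_eq_nil_iff]
  · rw [a_eq_descConcat sections query hne, alt_eq_descConcat]
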